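-- pv_equiv track=rewrite | github.com/yatiml/yatiml | yatiml/util.py | cjoin
-- ===== SOURCE A (Python) =====
-- from typing import (
--         Any, cast, Dict, Iterable, Mapping, MutableMapping, MutableSequence,
--         List, Sequence, Tuple, Union)
--
-- def cjoin(conjuction: str, words: Iterable[str]) -> str:
--     """Joins words together into a conjuctive clause.
--
--     This makes a nice enumeration out of the list of words. For
--     example, mjoin('and', ['x', 'y', 'z']) produces the string
--     'x, y and z'.
--     """
--     result = ''
--     words_list = list(words)
--     last_idx = len(words_list) - 1
--     for i, w in enumerate(words_list):
--         if i > 0: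
--             if i < last_idx:
--                 result += ', '
--             else:
--                 result += ' ' + conjuction + ' '
--         result += w
--     return result
-- ===== SOURCE B (Python) =====
-- def cjoin(conjuction, words):
--     """Joins words together into a conjuctive clause.
--
--     Simpler decomposition: comma-join the prefix, special-case the last word.
--     """
--     words_list = list(words)
--     if not words_list:
--         return ''
--     if len(words_list) == 1:
--         return words_list[0]
--     return ', '.join(words_list[:-1]) + ' ' + conjuction + ' ' + words_list[-1]
-- ===== Notes on version B (the rewrite author's own statement) =====
-- stated objective: simpler
-- what changed: Replaced the index-conditional per-element accumulation loop with explicit empty/single-word cases plus a ', '.join of the prefix and a concatenated final word.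
import Mathlib
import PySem

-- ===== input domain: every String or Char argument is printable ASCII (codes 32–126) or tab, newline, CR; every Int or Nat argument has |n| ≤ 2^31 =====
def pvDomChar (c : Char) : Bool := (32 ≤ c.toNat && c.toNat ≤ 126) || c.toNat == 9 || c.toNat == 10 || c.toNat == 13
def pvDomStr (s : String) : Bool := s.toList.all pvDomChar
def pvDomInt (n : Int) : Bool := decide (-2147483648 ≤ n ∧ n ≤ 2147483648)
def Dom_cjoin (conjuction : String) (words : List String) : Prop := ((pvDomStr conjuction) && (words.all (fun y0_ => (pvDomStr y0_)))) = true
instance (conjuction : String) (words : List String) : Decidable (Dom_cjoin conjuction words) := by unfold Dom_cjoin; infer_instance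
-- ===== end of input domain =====

-- B replaces A's index-conditional accumulation loop by explicit empty/single cases
-- plus a ', '-join of the prefix and a concatenated final word (objective: simpler).


-- ===== PORT A =====
def cjoin (conjuction : String) (words : List String) : String :=
  (PySem.List.enumerate words).foldl
    (fun result p =>
      (if p.1 > 0 then
        (if p.1 < (words.length : Int) - 1 then result ++ ", "
         else result ++ (" " ++ conjuction ++ " "))
       else result) ++ p.2)
    ""

-- ===== PORT B =====
def cjoin_alt (conjuction : String) (words : List String) : String :=
  match words with
  | [] => ""
  | [w] => w
  | w :: x :: rest =>
    PySem.Str.join ", " (PySem.List.slice (w :: x :: rest) none (some (-1)))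
      ++ " " ++ conjuction ++ " " ++ (w :: x :: rest).getLast (by simp)

-- ===== PRECONDITION & SPEC =====
def Spec_cjoin (conjuction : String) (words : List String) (out : String) : Prop := out = cjoin_alt conjuction words
instance (conjuction : String) (words : List String) (out : String) : Decidable (Spec_cjoin conjuction words out) := by unfold Spec_cjoin; infer_instance

-- ===== CLAIM (what is proved, stated in full; the proofs are below) =====
def Claim_equal_cjoin : Prop := ∀ (conjuction : String) (words : List String), Dom_cjoin conjuction words → Spec_cjoin conjuction words (cjoin conjuction words)

-- ===== LEMMAS AND PROOFS =====

-- appending ', ' ++ word for each word, starting from acc (the shape of both loops' middle part)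
def pvMid (acc : String) (zs : List String) : String :=
  zs.foldl (fun a z => a ++ ", " ++ z) acc

theorem pvMid_append (a b : String) (zs : List String) :
    pvMid (a ++ b) zs = a ++ pvMid b zs := by
  induction zs generalizing b with
  | nil => simp [pvMid]
  | cons z zs ih =>
    simp only [pvMid, List.foldl_cons] at *
    rw [show a ++ b ++ ", " ++ z = a ++ (b ++ ", " ++ z) by
          rw [@String.append_assoc a b ", ", @String.append_assoc a (b ++ ", ") z], ih]

theorem pvJoin_eq_pvMid (w : String) (zs : List String) :
    PySem.Str.join ", " (w :: zs) = pvMid w zs := by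
  induction zs generalizing w with
  | nil =>
    apply String.toList_inj.mp
    simp [PySem.Str.toList_join, PySem.Chars.join_singleton, pvMid]
  | cons z zs ih =>
    have h : PySem.Str.join ", " (w :: z :: zs) = w ++ ", " ++ PySem.Str.join ", " (z :: zs) := by
      apply String.toList_inj.mp
      simp [PySem.Str.toList_join, PySem.Chars.join_cons_cons]
    rw [h, ih, show pvMid w (z :: zs) = pvMid (w ++ ", " ++ z) zs from rfl,
        pvMid_append (w ++ ", ") z zs]

theorem pvLoop (c : String) (n : Int) (ys : List String) (s : Int) (acc : String)
    (hne : ys ≠ []) (hn : s + ys.length = n) (hs : 1 ≤ s) :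
    (PySem.List.enumerate ys s).foldl
      (fun result p =>
        (if p.1 > 0 then
          (if p.1 < n - 1 then result ++ ", "
           else result ++ (" " ++ c ++ " "))
         else result) ++ p.2)
      acc
    = pvMid acc ys.dropLast ++ " " ++ c ++ " " ++ ys.getLast hne := by
  induction ys generalizing s acc with
  | nil => exact absurd rfl hne
  | cons y ys ih =>
    cases ys with
    | nil =>
      have h0 : s > 0 := by omega
      have h1 : ¬ (s < n - 1) := by simp at hn; omega
      simp only [PySem.List.enumerate_cons, PySem.List.enumerate_nil, List.foldl_cons,
        List.foldl_nil, h0, h1, if_true, if_false]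
      simp [pvMid, String.append_assoc]
    | cons y' ys' =>
      rw [PySem.List.enumerate_cons, List.foldl_cons]
      have h0 : s > 0 := by omega
      have h1 : s < n - 1 := by
        simp only [List.length_cons] at hn; push_cast at hn; omega
      simp only [h0, h1, if_true]
      rw [ih (s + 1) _ (by simp)
          (by simp only [List.length_cons] at hn ⊢; push_cast at hn ⊢; omega) (by omega)]
      simp [pvMid, List.getLast]

theorem cjoin_eq (c : String) (ws : List String) : cjoin c ws = cjoin_alt c ws := by
  match ws with
  | [] => rfl
  | [w] =>
    simp [cjoin, cjoin_alt, PySem.List.enumerate_cons, PySem.List.enumerate_nil]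
  | w :: x :: rest =>
    unfold cjoin cjoin_alt
    rw [PySem.List.enumerate_cons, List.foldl_cons]
    simp only [show ¬((0:Int) > 0) by omega, if_false, zero_add]
    rw [pvLoop c ((w :: x :: rest).length : Int) (x :: rest) 1 ("" ++ w) (by simp)
        (by simp; omega) le_rfl]
    rw [PySem.List.slice_to_neg_one]
    have hd : (w :: x :: rest).dropLast = w :: (x :: rest).dropLast := by
      simp [List.dropLast]
    rw [hd, pvJoin_eq_pvMid]
    have hg : (w :: x :: rest).getLast (by simp) = (x :: rest).getLast (by simp) := by
      simp [List.getLast]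
    rw [hg]
    have : pvMid ("" ++ w) (x :: rest).dropLast = pvMid w (x :: rest).dropLast := by
      simp
    rw [this]

-- ===== VERDICT (by name: the statement is the Claim_ definition above) =====
theorem cjoin_spec : Claim_equal_cjoin := by
  intro c ws _
  exact cjoin_eq c ws
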